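-- pv_equiv track=rewrite | github.com/lin/lin.github.io | public/cp/cf/835/e.py | solve
-- ===== SOURCE A (Python) =====
-- def get_aver(arr):
--     res = 0
--     count = 0
--     for num in arr[::-1]:
--         if num == 0:
--             count += 1
--         else:
--             res += count
--     return res
--
-- def solve(n, nums):
--     if n == 1:
--         return 0
--
--     first_zero = None
--     last_one = None
--     for i, num in enumerate(nums):
--         if num == 0 and first_zero == None:
--             first_zero = i
--         if num == 1:
--             last_one = i
--
--     res = get_aver(nums)
--     if first_zero != None:
--         nums[first_zero] = 1
--         res = max(res, get_aver(nums))
--         nums[first_zero] = 0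
--
--     if last_one != None:
--         nums[last_one] = 0
--         res = max(res, get_aver(nums))
--         nums[last_one] = 1
--     return res
-- ===== SOURCE B (Python) =====
-- def solve(n, nums):
--     if n == 1:
--         return 0
--     base = 0          # inversion count: pairs (nonzero before a 0)
--     zeros = 0
--     nonzeros = 0
--     first_zero = None     # index of the first 0
--     last_one = None       # (nonzeros before, zeros before) at the last exact 1
--     i = 0
--     for num in nums:
--         if num == 0:
--             base += nonzeros
--             if first_zero is None:
--                 first_zero = i
--             zeros += 1
--         else:
--             if num == 1:
--                 last_one = (nonzeros, zeros)
--             nonzeros += 1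
--         i += 1
--     res = base
--     if first_zero is not None:
--         # flip first 0 -> 1: gains zeros to its right, loses the (all-nonzero) prefix
--         res = max(res, base + (zeros - 1) - first_zero)
--     if last_one is not None:
--         # flip last 1 -> 0: gains nonzeros before it, loses zeros after it
--         nzb, zb = last_one
--         res = max(res, base + nzb - (zeros - zb))
--     return res
-- ===== Notes on version B (the rewrite author's own statement) =====
-- stated objective: alternative
-- what changed: Replaces A's index scan plus three full inversion-counting passes over mutated copies of the array by one forward pass that accumulates the base inversion count and enough statistics (first-zero index, nonzeros/zeros before the last one) to compute both flip deltas in O(1), without mutating nums.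
import Mathlib
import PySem

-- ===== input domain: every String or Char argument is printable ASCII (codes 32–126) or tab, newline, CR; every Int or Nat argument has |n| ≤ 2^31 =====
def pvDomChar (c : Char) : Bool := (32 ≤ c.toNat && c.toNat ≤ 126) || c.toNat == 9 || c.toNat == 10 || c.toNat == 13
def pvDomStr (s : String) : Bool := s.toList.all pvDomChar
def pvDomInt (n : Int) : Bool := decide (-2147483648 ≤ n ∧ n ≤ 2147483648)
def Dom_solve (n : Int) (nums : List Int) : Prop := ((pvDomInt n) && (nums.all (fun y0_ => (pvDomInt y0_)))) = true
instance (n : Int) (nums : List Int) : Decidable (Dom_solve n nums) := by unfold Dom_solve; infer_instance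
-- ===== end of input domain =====

-- B replaces A's four passes (scan + three inversion counts over mutated copies) by one
-- forward pass and O(1) flip deltas (same asymptotic cost; a different decomposition).
-- A mutates nums in place but restores it before returning, so the net side effect is none.

-- ===== PORT A =====
-- loop body of get_aver's 'for num in arr[::-1]' (state = (res, count))
def averStep (rc : Int × Int) (num : Int) : Int × Int :=
  if num == 0 then (rc.1, rc.2 + 1) else (rc.1 + rc.2, rc.2)

-- arr[::-1] is arr.reverse (PySem.List.slice?_none_none_neg_one)
def get_aver (arr : List Int) : Int :=
  (arr.reverse.foldl averStep (0, 0)).1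

-- loop body of A's 'for i, num in enumerate(nums)' (state = (first_zero, last_one))
def aStep (s : Option Int × Option Int) (p : Int × Int) : Option Int × Option Int :=
  let s1 := if p.2 == 0 && s.1 == none then (some p.1, s.2) else s
  if p.2 == 1 then (s1.1, some p.1) else s1

def solve (n : Int) (nums : List Int) : Int :=
  if n == 1 then 0
  else
    let st := (PySem.List.enumerate nums).foldl aStep (none, none)
    let res := get_aver nums
    -- nums[first_zero] = 1 / nums[last_one] = 0: the index comes from enumerate, so it is
    -- a valid nonnegative position; List.set with .toNat is exact there.
    let res := match st.1 with
      | some f => max res (get_aver (nums.set f.toNat 1))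
      | none => res
    match st.2 with
      | some j => max res (get_aver (nums.set j.toNat 0))
      | none => res

-- ===== PORT B =====
structure BState where
  base : Int
  zeros : Int
  nonzeros : Int
  firstZero : Option Int
  lastOne : Option (Int × Int)
  i : Int
deriving Repr, DecidableEq

-- loop body of B's single forward pass
def bStep (s : BState) (num : Int) : BState :=
  if num == 0 then
    { s with base := s.base + s.nonzeros,
             firstZero := if s.firstZero == none then some s.i else s.firstZero,
             zeros := s.zeros + 1, i := s.i + 1 }
  else
    { s with lastOne := if num == 1 then some (s.nonzeros, s.zeros) else s.lastOne,
             nonzeros := s.nonzeros + 1, i := s.i + 1 }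

def solve_alt (n : Int) (nums : List Int) : Int :=
  if n == 1 then 0
  else
    let st := nums.foldl bStep ⟨0, 0, 0, none, none, 0⟩
    let res := st.base
    let res := match st.firstZero with
      | some f => max res (st.base + (st.zeros - 1) - f)
      | none => res
    match st.lastOne with
      | some (nzb, zb) => max res (st.base + nzb - (st.zeros - zb))
      | none => res

-- ===== PRECONDITION & SPEC =====
def Spec_solve (n : Int) (nums : List Int) (out : Int) : Prop := out = solve_alt n nums
instance (n : Int) (nums : List Int) (out : Int) : Decidable (Spec_solve n nums out) := by unfold Spec_solve; infer_instance

-- ===== CLAIM (what is proved, stated in full; the proofs are below) =====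
def Claim_equal_solve : Prop := ∀ (n : Int) (nums : List Int), Dom_solve n nums → Spec_solve n nums (solve n nums)

-- ===== LEMMAS AND PROOFS =====

-- zeros, nonzeros, inversion pairs (nonzero before a zero), first-zero index, last-one index
def Zc : List Int → Int
  | [] => 0
  | x :: t => (if x = 0 then 1 else 0) + Zc t

def Nc : List Int → Int
  | [] => 0
  | x :: t => (if x = 0 then 0 else 1) + Nc t

def Pc : List Int → Int
  | [] => 0
  | x :: t => (if x = 0 then 0 else Zc t) + Pc t

def FZ : List Int → Option Nat
  | [] => none
  | x :: t => if x = 0 then some 0 else (FZ t).map (· + 1)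

def LO : List Int → Option Nat
  | [] => none
  | x :: t =>
    match LO t with
    | some j => some (j + 1)
    | none => if x = 1 then some 0 else none

theorem aver_fold (l : List Int) : ∀ r c : Int,
    l.reverse.foldl averStep (r, c) = (r + Pc l + c * Nc l, c + Zc l) := by
  induction l with
  | nil => intro r c; simp [Pc, Nc, Zc]
  | cons x t ih =>
    intro r c
    simp only [List.reverse_cons, List.foldl_append, List.foldl_cons, List.foldl_nil, ih]
    by_cases hx : x = 0 <;> simp [averStep, hx, Pc, Nc, Zc] <;> ring_nf

theorem get_aver_eq (l : List Int) : get_aver l = Pc l := by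
  unfold get_aver
  rw [aver_fold]
  simp

theorem a_fold (l : List Int) : ∀ (k : Int) (f0 l0 : Option Int),
    (PySem.List.enumerate l k).foldl aStep (f0, l0) =
      ((match f0 with
        | some _ => f0
        | none => match FZ l with
          | some j => some (k + (j : Int))
          | none => none),
       (match LO l with
        | some j => some (k + (j : Int))
        | none => l0)) := by
  induction l with
  | nil => intro k f0 l0; cases f0 <;> simp [FZ, LO, PySem.List.enumerate_nil]
  | cons x t ih =>
    intro k f0 l0
    rw [PySem.List.enumerate_cons, List.foldl_cons, ih]
    by_cases hx0 : x = 0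
    · have hx1 : x ≠ 1 := by omega
      cases f0 <;> cases hLO : LO t <;>
        simp [aStep, hx0, hx1, FZ, LO, hLO] <;> (try push_cast) <;> (try ring_nf) <;>
          (try exact ⟨trivial, trivial⟩)
    · by_cases hx1 : x = 1 <;> cases f0 <;> cases hFZ : FZ t <;> cases hLO : LO t <;>
        simp [aStep, hx0, hx1, FZ, LO, hFZ, hLO] <;> (try push_cast) <;> (try ring_nf) <;>
          (try exact ⟨trivial, trivial⟩)

theorem b_fold (l : List Int) : ∀ s0 : BState,
    l.foldl bStep s0 =
      ⟨s0.base + Pc l + s0.nonzeros * Zc l,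
       s0.zeros + Zc l,
       s0.nonzeros + Nc l,
       (match s0.firstZero with
        | some _ => s0.firstZero
        | none => match FZ l with
          | some j => some (s0.i + (j : Int))
          | none => none),
       (match LO l with
        | some j => some (s0.nonzeros + Nc (l.take j), s0.zeros + Zc (l.take j))
        | none => s0.lastOne),
       s0.i + l.length⟩ := by
  induction l with
  | nil =>
    intro s0
    cases s0 with
    | mk b z nz fz lo i => cases fz <;> simp [Pc, Nc, Zc, FZ, LO]
  | cons x t ih =>
    intro s0
    rw [List.foldl_cons, ih]
    cases s0 with
    | mk b z nz fz lo i =>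
      by_cases hx0 : x = 0
      · have hx1 : x ≠ 1 := by omega
        cases fz <;> cases hLO : LO t <;>
          simp [bStep, hx0, hx1, FZ, LO, hLO, Pc, Nc, Zc, List.take_succ_cons] <;>
            and_intros <;> (try push_cast) <;> (try ring_nf) <;> (try trivial)
      · by_cases hx1 : x = 1 <;> cases fz <;> cases hFZ : FZ t <;> cases hLO : LO t <;>
          simp [bStep, hx0, hx1, FZ, LO, hFZ, hLO, Pc, Nc, Zc, List.take_succ_cons] <;>
            and_intros <;> (try push_cast) <;> (try ring_nf) <;> (try trivial)

theorem flip_first (l : List Int) : ∀ f : Nat, FZ l = some f →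
    Pc (l.set f 1) = Pc l + Zc l - 1 - (f : Int) ∧ Zc (l.set f 1) = Zc l - 1 := by
  induction l with
  | nil => intro f h; simp [FZ] at h
  | cons x t ih =>
    intro f h
    by_cases hx : x = 0
    · simp [FZ, hx] at h
      subst h
      simp [hx, Pc, Zc]; ring
    · simp [FZ, hx] at h
      obtain ⟨f', hf', rfl⟩ := h
      obtain ⟨h1, h2⟩ := ih f' hf'
      constructor <;> simp [List.set_cons_succ, Pc, Zc, hx, h1, h2] <;> push_cast <;> ring

theorem flip_last (l : List Int) : ∀ j : Nat, LO l = some j →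
    Pc (l.set j 0) = Pc l + Nc (l.take j) - (Zc l - Zc (l.take j)) ∧
      Zc (l.set j 0) = Zc l + 1 := by
  induction l with
  | nil => intro j h; simp [LO] at h
  | cons x t ih =>
    intro j h
    cases hLO : LO t with
    | some j' =>
      simp [LO, hLO] at h
      subst h
      obtain ⟨h1, h2⟩ := ih j' hLO
      by_cases hx : x = 0 <;>
        constructor <;>
          simp [List.set_cons_succ, List.take_succ_cons, Pc, Zc, Nc, hx, h1, h2] <;> ring
    | none =>
      by_cases hx : x = 1
      · simp [LO, hLO, hx] at h
        subst h
        constructor <;> simp [hx, Pc, Zc, Nc] <;> omega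
      · simp [LO, hLO, hx] at h

-- ===== VERDICT (by name: the statement is the Claim_ definition above) =====
theorem solve_spec : Claim_equal_solve := by
  intro n nums _
  unfold Spec_solve solve solve_alt
  by_cases hn : n = 1
  · simp [hn]
  · simp only [beq_iff_eq, hn, if_false]
    rw [a_fold, b_fold]
    simp only
    rw [get_aver_eq]
    cases hFZ : FZ nums with
    | none =>
      cases hLO : LO nums with
      | none => simp
      | some j =>
        have htn : ((0 : Int) + (j : Int)).toNat = j := by simp
        obtain ⟨h1, _⟩ := flip_last nums j hLO
        simp only [htn]
        rw [get_aver_eq, h1]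
        push_cast; ring_nf
    | some f =>
      have htnf : ((0 : Int) + (f : Int)).toNat = f := by simp
      obtain ⟨hf1, _⟩ := flip_first nums f hFZ
      cases hLO : LO nums with
      | none =>
        simp only [htnf]
        rw [get_aver_eq, hf1]
        push_cast; ring_nf
      | some j =>
        have htn : ((0 : Int) + (j : Int)).toNat = j := by simp
        obtain ⟨h1, _⟩ := flip_last nums j hLO
        simp only [htnf, htn]
        rw [get_aver_eq, get_aver_eq, hf1, h1]
        push_cast; ring_nf
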